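-- pv_equiv track=rewrite | github.com/mianameer314/Intelligent-University-Timetable-Generator- | Intelligent timetable for Uni(project).py | filter_timetable
-- ===== SOURCE A (Python) =====
-- def filter_timetable(timetable, filters):
--     def match(entry, key, value):
--         if not value:
--             return True
--         return value.lower() in str(entry.get(key, "")).lower()
--     return [
--         entry for entry in timetable
--         if match(entry, "program", filters.get("program", ""))
--         and match(entry, "course", filters.get("course", ""))
--         and match(entry, "teacher", filters.get("teacher", ""))
--         and match(entry, "room", filters.get("room", ""))
--         and match(entry, "day", filters.get("day", ""))
--         and match(entry, "time", filters.get("time", ""))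
--     ]
-- ===== SOURCE B (Python) =====
-- def filter_timetable(timetable, filters):
--     rejected = set()
--     for key in ("program", "course", "teacher", "room", "day", "time"):
--         val = filters.get(key, "")
--         if val:
--             needle = val.lower()
--             rejected |= {i for i, entry in enumerate(timetable)
--                          if needle not in str(entry.get(key, "")).lower()}
--     return [entry for i, entry in enumerate(timetable) if i not in rejected]
-- ===== Notes on version B (the rewrite author's own statement) =====
-- stated objective: alternative
-- what changed: Instead of testing a 6-way AND per entry, B builds for each active filter the set of indices of entries that fail it, unions these rejection sets, and returns the entries whose index is not in the union (complement of the union, correct by De Morgan).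
import Mathlib
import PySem

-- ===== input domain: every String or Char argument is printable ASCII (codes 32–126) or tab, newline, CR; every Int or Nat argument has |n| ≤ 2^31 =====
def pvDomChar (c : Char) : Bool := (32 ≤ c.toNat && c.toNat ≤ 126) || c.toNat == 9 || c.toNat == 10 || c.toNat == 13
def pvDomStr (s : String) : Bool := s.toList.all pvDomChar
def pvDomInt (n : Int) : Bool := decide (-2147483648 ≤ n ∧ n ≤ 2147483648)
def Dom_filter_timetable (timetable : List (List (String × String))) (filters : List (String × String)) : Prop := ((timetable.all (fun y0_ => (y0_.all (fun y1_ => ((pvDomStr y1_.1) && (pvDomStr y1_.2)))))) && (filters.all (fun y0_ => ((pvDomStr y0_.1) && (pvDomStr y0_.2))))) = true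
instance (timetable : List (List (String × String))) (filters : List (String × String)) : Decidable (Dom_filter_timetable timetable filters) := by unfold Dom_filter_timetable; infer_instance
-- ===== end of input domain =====

-- B builds, per active filter, the SET of indices of entries that fail it, unions these rejection
-- sets, and returns the entries whose index was never rejected (complement of the union, by
-- De Morgan equivalent to A's per-entry 6-way conjunction); same cost, different data structure.

-- ===== PORT A =====
-- inner helper `match(entry, key, value)` of A
def pvMatch (entry : List (String × String)) (key : String) (value : String) : Bool :=
  if value == "" then true
  else PySem.Str.isIn (PySem.Str.lower value)
    (PySem.Str.lower ((PySem.Dict.mk entry).getD key ""))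

def filter_timetable (timetable : List (List (String × String))) (filters : List (String × String)) : List (List (String × String)) :=
  timetable.filter (fun entry =>
    pvMatch entry "program" ((PySem.Dict.mk filters).getD "program" "") &&
    pvMatch entry "course"  ((PySem.Dict.mk filters).getD "course" "") &&
    pvMatch entry "teacher" ((PySem.Dict.mk filters).getD "teacher" "") &&
    pvMatch entry "room"    ((PySem.Dict.mk filters).getD "room" "") &&
    pvMatch entry "day"     ((PySem.Dict.mk filters).getD "day" "") &&
    pvMatch entry "time"    ((PySem.Dict.mk filters).getD "time" ""))

-- ===== PORT B =====
-- body of B's loop: rejected |= {i for i, entry in enumerate(timetable) if needle not in …}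
def pvRejectKey (timetable : List (List (String × String))) (filters : List (String × String))
    (rejected : PySem.Set Int) (key : String) : PySem.Set Int :=
  let val := (PySem.Dict.mk filters).getD key ""
  if val == "" then rejected
  else
    let needle := PySem.Str.lower val
    PySem.Set.union rejected (PySem.Set.ofList
      (((PySem.List.enumerate timetable 0).filter
          (fun p => !(PySem.Str.isIn needle (PySem.Str.lower ((PySem.Dict.mk p.2).getD key ""))))).map
        Prod.fst))

def filter_timetable_alt (timetable : List (List (String × String))) (filters : List (String × String)) : List (List (String × String)) :=
  let rejected := (["program", "course", "teacher", "room", "day", "time"]).foldl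
      (pvRejectKey timetable filters) PySem.Set.empty
  ((PySem.List.enumerate timetable 0).filter
      (fun p => !(PySem.Set.contains rejected p.1))).map Prod.snd

-- ===== PRECONDITION & SPEC =====
def Spec_filter_timetable (timetable : List (List (String × String))) (filters : List (String × String)) (out : List (List (String × String))) : Prop := out = filter_timetable_alt timetable filters
instance (timetable : List (List (String × String))) (filters : List (String × String)) (out : List (List (String × String))) : Decidable (Spec_filter_timetable timetable filters out) := by unfold Spec_filter_timetable; infer_instance

-- ===== CLAIM (what is proved, stated in full; the proofs are below) =====
def Claim_equal_filter_timetable : Prop := ∀ (timetable : List (List (String × String))) (filters : List (String × String)), Dom_filter_timetable timetable filters → Spec_filter_timetable timetable filters (filter_timetable timetable filters)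

-- ===== LEMMAS AND PROOFS =====

-- an index occurs at most once in an enumeration, so it determines the entry
theorem enum_entry_unique {α : Type} (tt : List α) {i : Int} {x e : α}
    (hx : (i, x) ∈ PySem.List.enumerate tt 0) (he : (i, e) ∈ PySem.List.enumerate tt 0) :
    x = e := by
  rcases (PySem.List.mem_enumerate_iff _ _ _).mp hx with ⟨k, hk, hkx⟩
  rcases (PySem.List.mem_enumerate_iff _ _ _).mp he with ⟨k', hk', hke⟩
  have h1 := congrArg Prod.fst hkx
  have h2 := congrArg Prod.fst hke
  simp at h1 h2
  have hkk : k = k' := by omega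
  subst hkk
  have := (congrArg Prod.snd hkx).trans (congrArg Prod.snd hke).symm
  simpa using this

-- an index i of an enumerated entry e appears in the rejection list iff e fails the test
theorem mem_fst_filter_enum {α : Type} (tt : List α) (q : Int × α → Bool) {i : Int} {e : α}
    (h : (i, e) ∈ PySem.List.enumerate tt 0) :
    i ∈ (((PySem.List.enumerate tt 0).filter q).map Prod.fst) ↔ q (i, e) = true := by
  constructor
  · intro hm
    rcases List.mem_map.mp hm with ⟨p, hp, hfst⟩
    rcases List.mem_filter.mp hp with ⟨hpmem, hq⟩
    rcases (PySem.List.mem_enumerate_iff _ _ _).mp hpmem with ⟨k, hk, rfl⟩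
    rcases (PySem.List.mem_enumerate_iff _ _ _).mp h with ⟨k', hk', hke⟩
    have hkk : (k : Int) = (k' : Int) := by
      have := congrArg Prod.fst hke
      simp at this ⊢
      omega
    have : k = k' := by exact_mod_cast hkk
    subst this
    have : ((0 + (k : Int), tt[k]) : Int × α) = (i, e) := hke.symm
    rw [this] at hq
    exact hq
  · intro hq
    exact List.mem_map.mpr ⟨(i, e), List.mem_filter.mpr ⟨h, hq⟩, rfl⟩

-- one pass of B's loop adds exactly the indices of entries failing A's `match` for that key
theorem contains_pvRejectKey (tt : List (List (String × String))) (fs : List (String × String))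
    (R : PySem.Set Int) (key : String) {i : Int} {e : List (String × String)}
    (h : (i, e) ∈ PySem.List.enumerate tt 0) :
    PySem.Set.contains (pvRejectKey tt fs R key) i =
      (PySem.Set.contains R i || !(pvMatch e key ((PySem.Dict.mk fs).getD key ""))) := by
  unfold pvRejectKey pvMatch
  by_cases hv : ((PySem.Dict.mk fs).getD key "" == "") = true
  · simp [hv]
  · rw [if_neg hv, if_neg hv]
    rcases hq : PySem.Chars.isIn (PySem.Chars.lower ((PySem.Dict.mk fs).getD key "").toList)
        (PySem.Chars.lower ((PySem.Dict.mk e).getD key "").toList) with _ | _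
    · -- entry e FAILS the filter: its index is in the added rejection set
      have hmem : i ∈ PySem.Set.union R (PySem.Set.ofList
          (((PySem.List.enumerate tt 0).filter
            (fun p => !(PySem.Str.isIn (PySem.Str.lower ((PySem.Dict.mk fs).getD key ""))
              (PySem.Str.lower ((PySem.Dict.mk p.2).getD key ""))))).map Prod.fst)) :=
        (PySem.Set.mem_union _ _ _).mpr (Or.inr ((PySem.Set.mem_ofList _ _).mpr
          ((mem_fst_filter_enum tt _ h).mpr (by simp [hq]))))
      rw [(PySem.Set.contains_iff _ _).mpr hmem]
      simp [hq]
    · -- entry e PASSES the filter: membership in the union reduces to membership in R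
      rcases hc : PySem.Set.contains R i with _ | _
      · simp [hq]
        refine ⟨fun hiR => by simp at hc; exact hc hiR, ?_⟩
        intro x hx
        rw [enum_entry_unique tt hx h]
        exact hq
      · have hmem : i ∈ PySem.Set.union R (PySem.Set.ofList
            (((PySem.List.enumerate tt 0).filter
              (fun p => !(PySem.Str.isIn (PySem.Str.lower ((PySem.Dict.mk fs).getD key ""))
                (PySem.Str.lower ((PySem.Dict.mk p.2).getD key ""))))).map Prod.fst)) :=
          (PySem.Set.mem_union _ _ _).mpr (Or.inl ((PySem.Set.contains_iff _ _).mp hc))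
        rw [(PySem.Set.contains_iff _ _).mpr hmem]
        simp [hq]

theorem bool_demorgan6 (a b c d e f : Bool) :
    ((((((false || !a) || !b) || !c) || !d) || !e) || !f) = !(a && b && c && d && e && f) := by
  cases a <;> cases b <;> cases c <;> cases d <;> cases e <;> cases f <;> rfl

-- after all six passes the index is rejected iff A's conjunction fails
theorem contains_fold (tt : List (List (String × String))) (fs : List (String × String))
    {i : Int} {e : List (String × String)} (h : (i, e) ∈ PySem.List.enumerate tt 0) :
    PySem.Set.contains ((["program", "course", "teacher", "room", "day", "time"]).foldl
        (pvRejectKey tt fs) PySem.Set.empty) i =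
      !(pvMatch e "program" ((PySem.Dict.mk fs).getD "program" "") &&
        pvMatch e "course"  ((PySem.Dict.mk fs).getD "course" "") &&
        pvMatch e "teacher" ((PySem.Dict.mk fs).getD "teacher" "") &&
        pvMatch e "room"    ((PySem.Dict.mk fs).getD "room" "") &&
        pvMatch e "day"     ((PySem.Dict.mk fs).getD "day" "") &&
        pvMatch e "time"    ((PySem.Dict.mk fs).getD "time" "")) := by
  simp only [List.foldl_cons, List.foldl_nil]
  rw [contains_pvRejectKey tt fs _ _ h, contains_pvRejectKey tt fs _ _ h,
      contains_pvRejectKey tt fs _ _ h, contains_pvRejectKey tt fs _ _ h,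
      contains_pvRejectKey tt fs _ _ h, contains_pvRejectKey tt fs _ _ h]
  have hempty : PySem.Set.contains (PySem.Set.empty : PySem.Set Int) i = false := rfl
  rw [hempty, bool_demorgan6]

-- filtering the enumeration on the entry only, then dropping the indices, is filtering the list
theorem map_snd_filter_snd {α : Type} (xs : List α) (s : Int) (P : α → Bool) :
    ((PySem.List.enumerate xs s).filter (fun p => P p.2)).map Prod.snd = xs.filter P := by
  induction xs generalizing s with
  | nil => simp [PySem.List.enumerate_nil]
  | cons x xs ih =>
    rw [PySem.List.enumerate_cons]
    rcases hP : P x with _ | _ <;> simp [hP, ih]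

theorem filter_timetable_eq (timetable : List (List (String × String))) (filters : List (String × String)) :
    filter_timetable timetable filters = filter_timetable_alt timetable filters := by
  apply Eq.symm
  unfold filter_timetable filter_timetable_alt
  show ((PySem.List.enumerate timetable 0).filter
      (fun p => !(PySem.Set.contains ((["program", "course", "teacher", "room", "day", "time"]).foldl
        (pvRejectKey timetable filters) PySem.Set.empty) p.1))).map Prod.snd = _
  have hcong : ∀ p ∈ PySem.List.enumerate timetable 0,
      (!(PySem.Set.contains ((["program", "course", "teacher", "room", "day", "time"]).foldl
          (pvRejectKey timetable filters) PySem.Set.empty) p.1)) =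
      (fun p : Int × List (String × String) =>
        (pvMatch p.2 "program" ((PySem.Dict.mk filters).getD "program" "") &&
         pvMatch p.2 "course"  ((PySem.Dict.mk filters).getD "course" "") &&
         pvMatch p.2 "teacher" ((PySem.Dict.mk filters).getD "teacher" "") &&
         pvMatch p.2 "room"    ((PySem.Dict.mk filters).getD "room" "") &&
         pvMatch p.2 "day"     ((PySem.Dict.mk filters).getD "day" "") &&
         pvMatch p.2 "time"    ((PySem.Dict.mk filters).getD "time" ""))) p := by
    intro p hp
    obtain ⟨i, e⟩ := p
    rw [contains_fold timetable filters hp, Bool.not_not]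
  rw [List.filter_congr hcong]
  exact map_snd_filter_snd timetable 0 (fun entry =>
    pvMatch entry "program" ((PySem.Dict.mk filters).getD "program" "") &&
    pvMatch entry "course"  ((PySem.Dict.mk filters).getD "course" "") &&
    pvMatch entry "teacher" ((PySem.Dict.mk filters).getD "teacher" "") &&
    pvMatch entry "room"    ((PySem.Dict.mk filters).getD "room" "") &&
    pvMatch entry "day"     ((PySem.Dict.mk filters).getD "day" "") &&
    pvMatch entry "time"    ((PySem.Dict.mk filters).getD "time" ""))

-- ===== VERDICT (by name: the statement is the Claim_ definition above) =====
theorem filter_timetable_spec : Claim_equal_filter_timetable := by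
  intro tt fs _
  exact filter_timetable_eq tt fs
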